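-- pv_equiv track=rewrite | github.com/SemanticSearching/SSApp | parser_engine/docx_parser.py | segment_clipper
-- ===== SOURCE A (Python) =====
-- def segment_clipper(segment: list, max_words: int=100):
--     """
--
--     :param max_words:
--     :param segment: list of sentences,["sent1", "sent2", "sent3", ...]
--     :return: list: list of sentences that have total of words less than maximum_words
--     """
--     total_words = 0
--     for i, sent in enumerate(segment):
--         word_count = len(sent.split(' '))
--         total_words += word_count
--
--         if (total_words > max_words) and (i > 0):
--             segment = segment[:i]
--             break
--
--     return segment
-- ===== SOURCE B (Python) =====
-- def segment_clipper(segment: list, max_words: int=100):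
--     cum = []
--     total = 0
--     for sent in segment:
--         total += len(sent.split(' '))
--         cum.append(total)
--     idx = next((i for i, c in enumerate(cum) if i > 0 and c > max_words), None)
--     return segment if idx is None else segment[:idx]
-- ===== Notes on version B (the rewrite author's own statement) =====
-- stated objective: alternative
-- what changed: Replaces A's fused accumulate-and-break loop over the sentences with a two-phase structure: first build the full cumulative word-count table, then search it for the first index past the limit and slice once.
import Mathlib
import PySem

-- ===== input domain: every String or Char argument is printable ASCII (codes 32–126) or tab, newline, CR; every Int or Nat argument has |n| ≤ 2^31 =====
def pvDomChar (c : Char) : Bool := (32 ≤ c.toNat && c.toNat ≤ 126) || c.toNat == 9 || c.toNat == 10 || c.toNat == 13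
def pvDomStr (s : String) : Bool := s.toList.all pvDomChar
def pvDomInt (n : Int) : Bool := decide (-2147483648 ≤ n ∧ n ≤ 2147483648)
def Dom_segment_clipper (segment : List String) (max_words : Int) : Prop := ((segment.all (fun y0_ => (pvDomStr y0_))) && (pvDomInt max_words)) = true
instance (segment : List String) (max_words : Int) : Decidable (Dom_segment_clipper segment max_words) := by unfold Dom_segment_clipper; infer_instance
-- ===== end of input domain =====

-- B replaces A's fused accumulate-and-break loop with a two-phase table-then-find structure
-- (build the cumulative word-count list, then search it); objective: alternative, not faster.

-- ===== PORT A =====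
-- len(sent.split(' ')) (sep nonempty, so Str.split? is always `some`); used by both ports.
def pvWordCount (s : String) : Int := ((PySem.Str.split? s " ").getD []).length

-- A's for-loop with running total and break: returns the break index (the i at which it truncates), none if no break.
def pvGoA (xs : List String) (i : Nat) (total max_words : Int) : Option Nat :=
  match xs with
  | [] => none
  | s :: rest =>
    let total := total + pvWordCount s
    if total > max_words ∧ i > 0 then some i else pvGoA rest (i + 1) total max_words

def segment_clipper (segment : List String) (max_words : Int) : List String :=
  match pvGoA segment 0 0 max_words with
  | none => segment
  | some i => PySem.List.slice segment none (some (i : Int))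

-- ===== PORT B =====
-- Source B's first loop: build the cumulative word-count table.
def pvCum (xs : List String) (total : Int) : List Int :=
  match xs with
  | [] => []
  | s :: rest =>
    let total := total + pvWordCount s
    total :: pvCum rest total

def segment_clipper_alt (segment : List String) (max_words : Int) : List String :=
  match (PySem.List.enumerate (pvCum segment 0)).find? (fun ic => decide (ic.1 > 0) && decide (ic.2 > max_words)) with
  | none => segment
  | some (i, _) => PySem.List.slice segment none (some i)

-- ===== PRECONDITION & SPEC =====
def Spec_segment_clipper (segment : List String) (max_words : Int) (out : List String) : Prop := out = segment_clipper_alt segment max_words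
instance (segment : List String) (max_words : Int) (out : List String) : Decidable (Spec_segment_clipper segment max_words out) := by unfold Spec_segment_clipper; infer_instance

-- ===== CLAIM (what is proved, stated in full; the proofs are below) =====
def Claim_equal_segment_clipper : Prop := ∀ (segment : List String) (max_words : Int), Dom_segment_clipper segment max_words → Spec_segment_clipper segment max_words (segment_clipper segment max_words)

-- ===== LEMMAS AND PROOFS =====

-- The search over the enumerated cumulative table from index i ≥ 1 finds exactly A's break index.
theorem pvFind_eq_goA (xs : List String) (i : Nat) (t mw : Int) (hi : 1 ≤ i) :
    ((PySem.List.enumerate (pvCum xs t) (i : Int)).find?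
        (fun ic => decide (ic.1 > 0) && decide (ic.2 > mw))).map Prod.fst
      = Option.map (fun n : Nat => (n : Int)) (pvGoA xs i t mw) := by
  induction xs generalizing i t with
  | nil => simp [pvCum, pvGoA, PySem.List.enumerate_nil]
  | cons s rest ih =>
    simp only [pvCum, pvGoA, PySem.List.enumerate_cons, List.find?_cons]
    have hpos : ((i : Int) > 0) := by exact_mod_cast Nat.lt_of_lt_of_le Nat.zero_lt_one hi
    by_cases h : t + pvWordCount s > mw
    · simp [h, Nat.lt_of_lt_of_le Nat.zero_lt_one hi]
    · have hb : (decide ((i : Int) > 0) && decide (t + pvWordCount s > mw)) = false := by simp [h]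
      rw [hb, if_neg (fun hc => h hc.1)]
      have := ih (i + 1) (t + pvWordCount s) (by omega)
      simpa [Nat.cast_add] using this

-- ===== VERDICT (by name: the statement is the Claim_ definition above) =====
theorem segment_clipper_spec : Claim_equal_segment_clipper := by
  intro segment max_words _
  unfold Spec_segment_clipper segment_clipper segment_clipper_alt
  cases segment with
  | nil => simp [pvGoA, pvCum, PySem.List.enumerate_nil]
  | cons s rest =>
    have key := pvFind_eq_goA rest 1 (0 + pvWordCount s) max_words le_rfl
    simp only [Nat.cast_one] at key
    have hA : pvGoA (s :: rest) 0 0 max_words = pvGoA rest 1 (0 + pvWordCount s) max_words := by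
      simp only [pvGoA]
      exact if_neg (fun hc => by exact absurd hc.2 (by omega))
    have hB : (PySem.List.enumerate (pvCum (s :: rest) 0)).find?
          (fun ic => decide (ic.1 > 0) && decide (ic.2 > max_words))
        = (PySem.List.enumerate (pvCum rest (0 + pvWordCount s)) 1).find?
          (fun ic => decide (ic.1 > 0) && decide (ic.2 > max_words)) := by
      simp only [pvCum, PySem.List.enumerate_cons, zero_add]
      exact List.find?_cons_of_neg (by simp)
    rw [hA, hB]
    cases hgo : pvGoA rest 1 (0 + pvWordCount s) max_words with
    | none =>
      rw [hgo, Option.map_none] at key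
      rw [Option.map_eq_none_iff.mp key]
    | some n =>
      rw [hgo, Option.map_some] at key
      obtain ⟨⟨pi, pc⟩, hp, hp1⟩ := Option.map_eq_some_iff.mp key
      rw [hp]
      dsimp at hp1
      rw [hp1]
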